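-- pv_equiv track=rewrite | github.com/halfline/git-stage-batch | src/git_stage_batch/batch/merge.py | _build_contiguous_runs
-- ===== SOURCE A (Python) =====
-- def _build_contiguous_runs(sorted_line_numbers: list[int]) -> list[tuple[int, int]]:
--     """Build contiguous inclusive runs from sorted line numbers."""
--     if not sorted_line_numbers:
--         return []
--
--     runs = []
--     run_start = sorted_line_numbers[0]
--     run_end = sorted_line_numbers[0]
--
--     for line_num in sorted_line_numbers[1:]:
--         if line_num == run_end + 1:
--             run_end = line_num
--         else:
--             runs.append((run_start, run_end))
--             run_start = line_num
--             run_end = line_num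
--
--     runs.append((run_start, run_end))
--     return runs
-- ===== SOURCE B (Python) =====
-- from itertools import groupby
--
--
-- def _build_contiguous_runs(sorted_line_numbers: list[int]) -> list[tuple[int, int]]:
--     """Build contiguous inclusive runs from sorted line numbers."""
--     runs = []
--     for _, grouped in groupby(enumerate(sorted_line_numbers), key=lambda p: p[1] - p[0]):
--         group = [value for _, value in grouped]
--         runs.append((group[0], group[-1]))
--     return runs
-- ===== Notes on version B (the rewrite author's own statement) =====
-- stated objective: idiomatic
-- what changed: Replaces the explicit run_start/run_end accumulator loop with the standard value-minus-index grouping idiom: itertools.groupby over enumerate keyed by value minus position, emitting each group's first and last value as the inclusive run.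
import Mathlib
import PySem

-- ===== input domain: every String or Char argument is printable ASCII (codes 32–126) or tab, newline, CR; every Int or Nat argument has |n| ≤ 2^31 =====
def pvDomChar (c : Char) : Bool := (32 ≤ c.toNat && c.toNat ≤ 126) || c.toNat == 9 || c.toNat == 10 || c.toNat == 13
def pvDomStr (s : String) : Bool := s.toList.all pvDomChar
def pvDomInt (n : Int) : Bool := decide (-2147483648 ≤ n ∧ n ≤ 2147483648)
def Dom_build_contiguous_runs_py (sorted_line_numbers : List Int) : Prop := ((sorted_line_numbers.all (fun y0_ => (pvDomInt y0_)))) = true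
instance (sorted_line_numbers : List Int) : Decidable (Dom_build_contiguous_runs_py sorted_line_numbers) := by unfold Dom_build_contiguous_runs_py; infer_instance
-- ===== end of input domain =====

-- B replaces A's run_start/run_end accumulator loop by the idiomatic value-minus-index groupby; return values proved equal on all inputs.

-- ===== PORT A =====
def build_contiguous_runs_py (sorted_line_numbers : List Int) : List (Int × Int) :=
  match sorted_line_numbers with
  | [] => []
  | first :: rest =>
    -- state: (runs, run_start, run_end)
    let st := rest.foldl
      (fun (s : List (Int × Int) × Int × Int) line_num =>
        if line_num == s.2.2 + 1 then (s.1, s.2.1, line_num)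
        else (s.1 ++ [(s.2.1, s.2.2)], line_num, line_num))
      ([], first, first)
    st.1 ++ [(st.2.1, st.2.2)]

-- ===== PORT B =====
-- itertools.groupby on consecutive equal keys (key is the first component)
def pvGroupByKey : List (Int × Int) → List (List (Int × Int))
  | [] => []
  | p :: rest =>
      (p :: rest.takeWhile (fun q => q.1 == p.1)) ::
        pvGroupByKey (rest.dropWhile (fun q => q.1 == p.1))
termination_by l => l.length
decreasing_by
  simp only [List.length_cons]
  exact Nat.lt_succ_of_le (List.length_dropWhile_le _ _)

def build_contiguous_runs_py_alt (sorted_line_numbers : List Int) : List (Int × Int) :=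
  let keyed := (PySem.List.enumerate sorted_line_numbers).map (fun p => (p.2 - p.1, p.2))
  (pvGroupByKey keyed).map (fun grouped =>
    let group := grouped.map (fun p => p.2)
    (group.headD 0, group.getLastD 0))

-- ===== PRECONDITION & SPEC =====
def Spec_build_contiguous_runs_py (sorted_line_numbers : List Int) (out : List (Int × Int)) : Prop := out = build_contiguous_runs_py_alt sorted_line_numbers
instance (sorted_line_numbers : List Int) (out : List (Int × Int)) : Decidable (Spec_build_contiguous_runs_py sorted_line_numbers out) := by unfold Spec_build_contiguous_runs_py; infer_instance

-- ===== CLAIM (what is proved, stated in full; the proofs are below) =====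
def Claim_equal_build_contiguous_runs_py : Prop := ∀ (sorted_line_numbers : List Int), Dom_build_contiguous_runs_py sorted_line_numbers → Spec_build_contiguous_runs_py sorted_line_numbers (build_contiguous_runs_py sorted_line_numbers)

-- ===== LEMMAS AND PROOFS =====

-- reference recursion: the runs of a nonempty list with current run (rs, re)
def pvGo (rs re : Int) : List Int → List (Int × Int)
  | [] => [(rs, re)]
  | y :: ys => if y = re + 1 then pvGo rs y ys else (rs, re) :: pvGo y y ys

-- keyed tail starting at index i: K i xs = [(x - j, x) | (j, x) ∈ enumerate xs i]
def pvK (i : Int) : List Int → List (Int × Int)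
  | [] => []
  | x :: xs => (x - i, x) :: pvK (i + 1) xs

theorem pvK_enum (xs : List Int) (i : Int) :
    (PySem.List.enumerate xs i).map (fun p => (p.2 - p.1, p.2)) = pvK i xs := by
  induction xs generalizing i with
  | nil => simp [PySem.List.enumerate_nil, pvK]
  | cons x xs ih => simp [PySem.List.enumerate_cons, pvK, ih]

theorem pvA_foldl (xs : List Int) (runs : List (Int × Int)) (rs re : Int) :
    (let st := xs.foldl
      (fun (s : List (Int × Int) × Int × Int) line_num =>
        if line_num == s.2.2 + 1 then (s.1, s.2.1, line_num)
        else (s.1 ++ [(s.2.1, s.2.2)], line_num, line_num))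
      (runs, rs, re)
     st.1 ++ [(st.2.1, st.2.2)]) = runs ++ pvGo rs re xs := by
  induction xs generalizing runs rs re with
  | nil => simp [pvGo]
  | cons y ys ih =>
    simp only [List.foldl_cons, pvGo]
    by_cases h : y = re + 1
    · have hb : (y == re + 1) = true := by simp [h]
      rw [hb]
      simp only [if_true, if_pos h]
      rw [h]
      simpa using ih runs rs (re + 1)
    · have hb : (y == re + 1) = false := by simp [h]
      rw [hb]
      simp only [Bool.false_eq_true, if_false, if_neg h]
      rw [show runs ++ (rs, re) :: pvGo y y ys = (runs ++ [(rs, re)]) ++ pvGo y y ys by simp]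
      simpa using ih (runs ++ [(rs, re)]) y y

theorem pvM (xs : List Int) (i re rs : Int) :
    ((rs, ((((re - i, re) :: (pvK (i + 1) xs).takeWhile (fun q => q.1 == re - i)).map
        (fun p => p.2)).getLastD 0)) ::
      (pvGroupByKey ((pvK (i + 1) xs).dropWhile (fun q => q.1 == re - i))).map
        (fun grouped => ((grouped.map (fun p => p.2)).headD 0,
                         (grouped.map (fun p => p.2)).getLastD 0)))
      = pvGo rs re xs := by
  induction xs generalizing i re rs with
  | nil => simp [pvK, pvGroupByKey, pvGo]
  | cons y ys ih =>
    by_cases h : y = re + 1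
    · have hk : y - (i + 1) = re - i := by omega
      have hpred : ((y - (i + 1) : Int) == re - i) = true := by simp [hk]
      simp only [pvK, List.takeWhile_cons, List.dropWhile_cons, hpred, if_true,
        List.map_cons, List.getLastD_cons, pvGo, if_pos h]
      have := ih (i + 1) y rs
      rw [hk] at this
      simpa only [List.map_cons, List.getLastD_cons] using this
    · have hpred : ((y - (i + 1) : Int) == re - i) = false := by simp; omega
      simp only [pvK, List.takeWhile_cons, List.dropWhile_cons, hpred,
        Bool.false_eq_true, if_false, List.map_cons, List.map_nil, pvGo, if_neg h]
      rw [pvGroupByKey]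
      have := ih (i + 1) y y
      rw [← this]
      simp only [List.getLastD_eq_getLast?, List.map_cons,
        List.headD_eq_head?, List.head?_cons, Option.getD_some]
      simp

theorem build_contiguous_runs_py_spec : Claim_equal_build_contiguous_runs_py := by
  unfold Claim_equal_build_contiguous_runs_py Spec_build_contiguous_runs_py
  intro xs _
  cases xs with
  | nil => simp [build_contiguous_runs_py, build_contiguous_runs_py_alt,
      PySem.List.enumerate_nil, pvGroupByKey]
  | cons x rest =>
    have hA : build_contiguous_runs_py (x :: rest) = pvGo x x rest := by
      simpa [build_contiguous_runs_py] using pvA_foldl rest [] x x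
    have hB : build_contiguous_runs_py_alt (x :: rest) = pvGo x x rest := by
      unfold build_contiguous_runs_py_alt
      rw [pvK_enum]
      simp only [pvK]
      rw [pvGroupByKey]
      have := pvM rest 0 x x
      simp only [sub_zero, zero_add] at this ⊢
      rw [← this]
      simp only [List.getLastD_eq_getLast?, List.map_cons,
        List.headD_eq_head?, List.head?_cons, Option.getD_some]
    rw [hA, hB]
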